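-- pv_equiv track=rewrite | github.com/annah11/A2SV-hub | B_The_Ethiopian_Lakes.py | lakes
-- ===== SOURCE A (Python) =====
-- from collections import deque
--
-- def lakes(test):
--     ans = []
--     for case in test:
--         n, m, grid = case
--         visit = [[False] * m for _ in range(n)]
--
--         def bfs(x, y):
--             q = deque()
--             q.append((x, y))
--             visit[x][y] = True
--             volume = grid[x][y]
--
--             directions = [(-1, 0), (1, 0), (0, -1), (0, 1)]
--
--             while q:
--                 i, j = q.popleft()
--                 for dx, dy in directions:
--                     ni, nj = i + dx, j + dy
--                     if 0 <= ni < n and 0 <= nj < m: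
--                         if not visit[ni][nj] and grid[ni][nj] > 0:
--                             visit[ni][nj] = True
--                             volume += grid[ni][nj]
--                             q.append((ni, nj))
--             return volume
--
--         maxx = 0
--         for i in range(n):
--             for j in range(m):
--                 if grid[i][j] > 0 and not visit[i][j]:
--                     maxx = max(maxx, bfs(i, j))
--
--         ans.append(maxx)
--
--     return ans
-- ===== SOURCE B (Python) =====
-- def _find(parent, x):
--     while parent[x] != x:
--         x = parent[x]
--     return x
--
--
-- def _union(parent, a, b):
--     ra = _find(parent, a)
--     rb = _find(parent, b)
--     if ra != rb:
--         parent[ra] = rb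
--
--
-- def _case(n, m, grid):
--     if n <= 0 or m <= 0:
--         return 0
--     parent = list(range(n * m))
--     for i in range(n):
--         for j in range(m):
--             if grid[i][j] > 0:
--                 if i + 1 < n and grid[i + 1][j] > 0:
--                     _union(parent, i * m + j, (i + 1) * m + j)
--                 if j + 1 < m and grid[i][j + 1] > 0:
--                     _union(parent, i * m + j, i * m + j + 1)
--     total = {}
--     for i in range(n):
--         for j in range(m):
--             if grid[i][j] > 0:
--                 r = _find(parent, i * m + j)
--                 total[r] = total.get(r, 0) + grid[i][j]
--     best = 0
--     for v in total.values():
--         if v > best: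
--             best = v
--     return best
--
--
-- def lakes(test):
--     return [_case(n, m, grid) for (n, m, grid) in test]
-- ===== Notes on version B (the rewrite author's own statement) =====
-- stated objective: alternative
-- what changed: The per-case BFS flood fill (deque + shared visited matrix, one BFS per unvisited positive cell) is replaced by union-find over flattened cell indices i*m+j: union each positive cell with its positive right/down neighbour, then accumulate each component's volume in a dict keyed by root and take the maximum (0 for all-nonpositive grids).
import Mathlib
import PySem

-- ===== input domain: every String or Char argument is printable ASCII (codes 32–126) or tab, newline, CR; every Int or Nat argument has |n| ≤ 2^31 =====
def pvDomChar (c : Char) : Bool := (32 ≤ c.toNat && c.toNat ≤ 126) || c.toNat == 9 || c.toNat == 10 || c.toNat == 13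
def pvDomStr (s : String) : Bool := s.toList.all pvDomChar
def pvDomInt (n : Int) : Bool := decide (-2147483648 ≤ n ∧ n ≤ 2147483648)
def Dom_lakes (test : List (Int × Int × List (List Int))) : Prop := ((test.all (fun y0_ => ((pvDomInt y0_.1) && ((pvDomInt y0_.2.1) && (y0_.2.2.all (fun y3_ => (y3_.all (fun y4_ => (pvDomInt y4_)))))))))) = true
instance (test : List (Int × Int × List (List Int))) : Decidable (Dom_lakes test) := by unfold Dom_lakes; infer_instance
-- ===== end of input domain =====

-- B replaces A's per-component BFS flood fill (deque + shared visited matrix) by union-find over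
-- flattened cell indices with a root-keyed volume dict; same return value, no argument is mutated.

-- ===== PORT A =====

-- grid[i][j]; exact for in-range indices (Pre_lakes guarantees every access is in range)
def gridAt (grid : List (List Int)) (i j : Int) : Int :=
  PySem.List.pyGetD (PySem.List.pyGetD grid i []) j 0

def lakesDirs : List (Int × Int) := [(-1, 0), (1, 0), (0, -1), (0, 1)]

-- body of `for dx, dy in directions`
def lakesDirStep (n m : Int) (grid : List (List Int)) (i j : Int)
    (st : ((Int × Int) → Bool) × List (Int × Int) × Int) (d : Int × Int) :
    ((Int × Int) → Bool) × List (Int × Int) × Int :=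
  let ni := i + d.1
  let nj := j + d.2
  if 0 ≤ ni ∧ ni < n ∧ 0 ≤ nj ∧ nj < m then
    if st.1 (ni, nj) = false ∧ gridAt grid ni nj > 0 then
      (fun c => if c = (ni, nj) then true else st.1 c,
       st.2.1 ++ [(ni, nj)], st.2.2 + gridAt grid ni nj)
    else st
  else st

-- the `while q:` loop; fuel-indexed (fuel 2*n*m+2 is never exhausted: each
-- iteration pops one queue entry and every push marks a fresh cell visited)
def lakesBfs (n m : Int) (grid : List (List Int)) :
    Nat → List (Int × Int) → ((Int × Int) → Bool) → Int → (((Int × Int) → Bool) × Int)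
  | _, [], visit, volume => (visit, volume)
  | 0, _ :: _, visit, volume => (visit, volume)
  | f + 1, (i, j) :: rest, visit, volume =>
    let st := lakesDirs.foldl (lakesDirStep n m grid i j) (visit, [], volume)
    lakesBfs n m grid f (rest ++ st.2.1) st.1 st.2.2

-- `bfs(x, y)` (the visited matrix is threaded as a characteristic function)
def lakesBfsRun (n m : Int) (grid : List (List Int)) (x y : Int)
    (visit : (Int × Int) → Bool) : (((Int × Int) → Bool) × Int) :=
  lakesBfs n m grid (2 * (n * m).toNat + 2) [(x, y)]
    (fun c => if c = (x, y) then true else visit c) (gridAt grid x y)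

def lakesCase (c : Int × Int × List (List Int)) : Int :=
  let n := c.1
  let m := c.2.1
  let grid := c.2.2
  let res := (PySem.List.pyRange 0 n 1).foldl (fun st i =>
      (PySem.List.pyRange 0 m 1).foldl (fun (st : ((Int × Int) → Bool) × Int) j =>
        if gridAt grid i j > 0 ∧ st.1 (i, j) = false then
          let r := lakesBfsRun n m grid i j st.1
          (r.1, max st.2 r.2)
        else st) st) ((fun _ => false), 0)
  res.2

def lakes (test : List (Int × Int × List (List Int))) : List Int :=
  test.foldl (fun ans c => ans ++ [lakesCase c]) []

-- ===== PORT B =====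

-- `_find(parent, x)`: follow parents to the root (fuel n*m+1 is never exhausted:
-- the parent forest is acyclic with at most n*m nodes)
def ufFind (p : Int → Int) : Nat → Int → Int
  | 0, x => x
  | f + 1, x => if p x = x then x else ufFind p f (p x)

-- `_union(parent, a, b)`
def ufUnion (p : Int → Int) (fuel : Nat) (a b : Int) : Int → Int :=
  let ra := ufFind p fuel a
  let rb := ufFind p fuel b
  if ra = rb then p else fun x => if x = ra then rb else p x

def altCase (c : Int × Int × List (List Int)) : Int :=
  let n := c.1
  let m := c.2.1
  let grid := c.2.2
  if n ≤ 0 ∨ m ≤ 0 then 0 else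
  let fuel := (n * m).toNat + 1
  let parent := (PySem.List.pyRange 0 n 1).foldl (fun p i =>
      (PySem.List.pyRange 0 m 1).foldl (fun (p : Int → Int) j =>
        if gridAt grid i j > 0 then
          let p1 := if i + 1 < n ∧ gridAt grid (i + 1) j > 0 then
              ufUnion p fuel (i * m + j) ((i + 1) * m + j) else p
          if j + 1 < m ∧ gridAt grid i (j + 1) > 0 then
              ufUnion p1 fuel (i * m + j) (i * m + j + 1) else p1
        else p) p) (fun x => x)
  let total := (PySem.List.pyRange 0 n 1).foldl (fun d i =>
      (PySem.List.pyRange 0 m 1).foldl (fun (d : PySem.Dict Int Int) j =>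
        if gridAt grid i j > 0 then
          let r := ufFind parent fuel (i * m + j)
          d.insert r (d.getD r 0 + gridAt grid i j)
        else d) d) (PySem.Dict.empty)
  total.values.foldl (fun best v => if v > best then v else best) 0

def lakes_alt (test : List (Int × Int × List (List Int))) : List Int :=
  test.map altCase

-- ===== PRECONDITION & SPEC =====

-- Pre_lakes excludes exactly the inputs on which A raises IndexError: a case with
-- positive declared sizes n, m whose grid has fewer than n rows, or one of the
-- first n rows shorter than m.
def Pre_lakes (test : List (Int × Int × List (List Int))) : Prop :=
  ∀ c ∈ test, (0 < c.1 ∧ 0 < c.2.1) →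
    (c.1 ≤ (c.2.2.length : Int) ∧ ∀ row ∈ c.2.2.take c.1.toNat, c.2.1 ≤ (row.length : Int))
instance (test : List (Int × Int × List (List Int))) : Decidable (Pre_lakes test) := by
  unfold Pre_lakes; infer_instance

def pvWitness_lakes : (List (Int × Int × List (List Int))) :=
  [(2, 2, [[1, -1], [2, 3]]), (1, 3, [[0, 4, 4]])]

def Spec_lakes (test : List (Int × Int × List (List Int))) (out : List Int) : Prop := out = lakes_alt test
instance (test : List (Int × Int × List (List Int))) (out : List Int) : Decidable (Spec_lakes test out) := by unfold Spec_lakes; infer_instance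

-- ===== CLAIM (what is proved, stated in full; the proofs are below) =====
def Claim_equal_lakes : Prop := ∀ (test : List (Int × Int × List (List Int))), Dom_lakes test → Pre_lakes test → Spec_lakes test (lakes test)

-- ===== LEMMAS AND PROOFS =====

-- ---------- shared geometric infrastructure ----------

def cellsL (n m : Int) : List (Int × Int) :=
  (PySem.List.pyRange 0 n 1).flatMap (fun i => (PySem.List.pyRange 0 m 1).map (fun j => (i, j)))

abbrev InB (n m : Int) (c : Int × Int) : Prop :=
  0 ≤ c.1 ∧ c.1 < n ∧ 0 ≤ c.2 ∧ c.2 < m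

abbrev PosC (n m : Int) (g : List (List Int)) (c : Int × Int) : Prop :=
  InB n m c ∧ 0 < gridAt g c.1 c.2

abbrev AdjC (n m : Int) (g : List (List Int)) (c d : Int × Int) : Prop :=
  PosC n m g c ∧ PosC n m g d ∧
    ((c.1 = d.1 ∧ (c.2 = d.2 + 1 ∨ d.2 = c.2 + 1)) ∨
     (c.2 = d.2 ∧ (c.1 = d.1 + 1 ∨ d.1 = c.1 + 1)))

def ConnC (n m : Int) (g : List (List Int)) : (Int × Int) → (Int × Int) → Prop :=
  Relation.ReflTransGen (AdjC n m g)

lemma cellsL_eq_product (n m : Int) :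
    cellsL n m = (PySem.List.pyRange 0 n 1) ×ˢ (PySem.List.pyRange 0 m 1) := rfl

lemma mem_cellsL (n m : Int) (c : Int × Int) : c ∈ cellsL n m ↔ InB n m c := by
  rcases c with ⟨i, j⟩
  rw [cellsL_eq_product]
  rw [List.mem_product]
  simp only [PySem.List.mem_pyRange_one, InB]
  omega

lemma nodup_cellsL (n m : Int) : (cellsL n m).Nodup := by
  rw [cellsL_eq_product]
  exact List.Nodup.product (PySem.List.nodup_pyRange_one _ _) (PySem.List.nodup_pyRange_one _ _)

lemma cellsL_nil {n m : Int} (h : n ≤ 0 ∨ m ≤ 0) : cellsL n m = [] := by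
  unfold cellsL
  rcases h with h | h
  · rw [PySem.List.pyRange_one_eq_nil (show n ≤ (0 : Int) from h)]
    rfl
  · rw [PySem.List.pyRange_one_eq_nil (show m ≤ (0 : Int) from h)]
    simp

lemma adjC_symm (n m : Int) (g : List (List Int)) :
    ∀ {c d}, AdjC n m g c d → AdjC n m g d c := by
  rintro c d ⟨h1, h2, h3⟩
  exact ⟨h2, h1, by tauto⟩

lemma connC_symm (n m : Int) (g : List (List Int)) {c d : Int × Int} :
    ConnC n m g c d → ConnC n m g d c := fun h =>
  Relation.ReflTransGen.symmetric (r := AdjC n m g) (fun _ _ hh => adjC_symm n m g hh) h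

lemma connC_trans (n m : Int) (g : List (List Int)) {a b c : Int × Int} :
    ConnC n m g a b → ConnC n m g b c → ConnC n m g a c :=
  Relation.ReflTransGen.trans

lemma connC_pos (n m : Int) (g : List (List Int)) {s c : Int × Int}
    (hs : PosC n m g s) (h : ConnC n m g s c) : PosC n m g c := by
  induction h with
  | refl => exact hs
  | tail _ hadj _ => exact hadj.2.1

lemma connC_class_eq (n m : Int) (g : List (List Int)) {s c : Int × Int}
    (h : ConnC n m g s c) : ∀ x, ConnC n m g s x ↔ ConnC n m g c x := by
  intro x
  exact ⟨fun hx => connC_trans n m g (connC_symm n m g h) hx,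
         fun hx => connC_trans n m g h hx⟩

def cellF (n m : Int) : Finset (Int × Int) := (cellsL n m).toFinset

lemma mem_cellF (n m : Int) (c : Int × Int) : c ∈ cellF n m ↔ InB n m c := by
  simp [cellF, List.mem_toFinset, mem_cellsL]

noncomputable def compF (n m : Int) (g : List (List Int)) (s : Int × Int) : Finset (Int × Int) :=
  @Finset.filter _ (fun c => ConnC n m g s c) (Classical.decPred _) (cellF n m)

lemma mem_compF (n m : Int) (g : List (List Int)) (s c : Int × Int) :
    c ∈ compF n m g s ↔ c ∈ cellF n m ∧ ConnC n m g s c := by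
  simp [compF, Finset.mem_filter]

noncomputable def compVol (n m : Int) (g : List (List Int)) (s : Int × Int) : Int :=
  ∑ c ∈ compF n m g s, gridAt g c.1 c.2

lemma compVol_class_eq (n m : Int) (g : List (List Int)) {s c : Int × Int}
    (h : ConnC n m g s c) : compVol n m g s = compVol n m g c := by
  unfold compVol
  apply Finset.sum_congr _ (fun _ _ => rfl)
  ext x
  simp [mem_compF, connC_class_eq n m g h x]

lemma foldl_nested (n m : Int) {sigma : Type _} (f : sigma → Int → Int → sigma) (init : sigma) :
    (PySem.List.pyRange 0 n 1).foldl
        (fun st i => (PySem.List.pyRange 0 m 1).foldl (fun st j => f st i j) st) init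
      = (cellsL n m).foldl (fun st c => f st c.1 c.2) init := by
  unfold cellsL
  induction (PySem.List.pyRange 0 n 1) generalizing init with
  | nil => rfl
  | cons i t ih => simp only [List.flatMap_cons, List.foldl_append, List.foldl_cons,
      List.foldl_map, ih]

lemma foldl_flatMap' {alpha beta sigma : Type _} (l : List alpha) (gf : alpha → List beta)
    (f : sigma → beta → sigma) (init : sigma) :
    (l.flatMap gf).foldl f init = l.foldl (fun a x => (gf x).foldl f a) init := by
  induction l generalizing init with
  | nil => rfl
  | cons x t ih => simp only [List.flatMap_cons, List.foldl_append, List.foldl_cons, ih]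

lemma cellsL_length_le (n m : Int) : (cellsL n m).length ≤ (n * m).toNat := by
  rw [cellsL_eq_product, List.length_product]
  simp only [PySem.List.length_pyRange_one, Int.sub_zero]
  rcases le_or_gt n 0 with hn | hn
  · simp [Int.toNat_of_nonpos hn]
  rcases le_or_gt m 0 with hm | hm
  · simp [Int.toNat_of_nonpos hm]
  have : (n * m).toNat = n.toNat * m.toNat := by
    rw [Int.toNat_mul (by omega) (by omega)]
  omega

-- a Python "max-accumulator" fold is bounded by any common bound
lemma foldl_max_le {l : List Int} {a c : Int} (ha : a ≤ c) (h : ∀ x ∈ l, x ≤ c) :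
    l.foldl max a ≤ c := by
  induction l generalizing a with
  | nil => exact ha
  | cons x t ih => exact ih (by have := h x (by simp); omega) (fun y hy => h y (by simp [hy]))

-- ---------- A side: BFS characterization ----------

lemma dirStep_eq (n m : Int) (g : List (List Int)) (i j : Int)
    (st : ((Int × Int) → Bool) × List (Int × Int) × Int) (d : Int × Int) :
    lakesDirStep n m g i j st d =
      if 0 ≤ i + d.1 ∧ i + d.1 < n ∧ 0 ≤ j + d.2 ∧ j + d.2 < m then
        if st.1 (i + d.1, j + d.2) = false ∧ gridAt g (i + d.1) (j + d.2) > 0 then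
          (fun c => if c = (i + d.1, j + d.2) then true else st.1 c,
           st.2.1 ++ [(i + d.1, j + d.2)], st.2.2 + gridAt g (i + d.1) (j + d.2))
        else st
      else st := rfl

def visFin (n m : Int) (v : (Int × Int) → Bool) : Finset (Int × Int) :=
  (cellF n m).filter (fun c => v c = true)

lemma mem_visFin (n m : Int) (v : (Int × Int) → Bool) (c : Int × Int) :
    c ∈ visFin n m v ↔ InB n m c ∧ v c = true := by
  simp [visFin, Finset.mem_filter, mem_cellF]

lemma visFin_mark (n m : Int) (v : (Int × Int) → Bool) {e : Int × Int} (he : InB n m e) :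
    visFin n m (fun c => if c = e then true else v c) = insert e (visFin n m v) := by
  ext c
  by_cases hc : c = e
  · subst hc; simp [mem_visFin]; exact he
  · simp [mem_visFin, hc, Finset.mem_insert]

lemma rtg_propagate (n m : Int) (g : List (List Int)) (v : (Int × Int) → Bool)
    (hCl : ∀ c d, v c = true → AdjC n m g c d → v d = true) :
    ∀ {a b : Int × Int}, ConnC n m g a b → v a = true → v b = true := by
  intro a b h
  induction h with
  | refl => exact fun h => h
  | tail _ hadj ih => exact fun ha => hCl _ _ (ih ha) hadj

lemma closed_not_conn (n m : Int) (g : List (List Int)) (v : (Int × Int) → Bool)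
    (hCl : ∀ c d, v c = true → AdjC n m g c d → v d = true) {s : Int × Int}
    (hs : v s = false) : ∀ c, v c = true → ¬ ConnC n m g s c := by
  intro c hc hconn
  have := rtg_propagate n m g v hCl (connC_symm n m g hconn) hc
  rw [hs] at this; exact Bool.false_ne_true this

lemma adj_dir (n m : Int) (g : List (List Int)) {c d : Int × Int} (h : AdjC n m g c d) :
    ∃ dd ∈ lakesDirs, d = (c.1 + dd.1, c.2 + dd.2) := by
  rcases h with ⟨_, _, hgeo⟩
  rcases hgeo with ⟨h1, h2 | h2⟩ | ⟨h1, h2 | h2⟩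
  · exact ⟨(0, -1), by simp [lakesDirs], Prod.ext_iff.mpr ⟨by omega, by omega⟩⟩
  · exact ⟨(0, 1), by simp [lakesDirs], Prod.ext_iff.mpr ⟨by omega, by omega⟩⟩
  · exact ⟨(-1, 0), by simp [lakesDirs], Prod.ext_iff.mpr ⟨by omega, by omega⟩⟩
  · exact ⟨(1, 0), by simp [lakesDirs], Prod.ext_iff.mpr ⟨by omega, by omega⟩⟩

-- invariant carried through the fold over the four directions
def DIb (n m : Int) (g : List (List Int)) (s : Int × Int) (V0 v : (Int × Int) → Bool)
    (st : ((Int × Int) → Bool) × List (Int × Int) × Int) : Prop :=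
  (∀ c, v c = true → st.1 c = true) ∧
  (∀ c, st.1 c = true → v c = true ∨ c ∈ st.2.1) ∧
  (∀ c ∈ st.2.1, st.1 c = true ∧ PosC n m g c ∧ ConnC n m g s c) ∧
  (st.2.2 = ∑ c ∈ (visFin n m st.1 \ visFin n m V0), gridAt g c.1 c.2) ∧
  (2 * ((cellF n m) \ visFin n m st.1).card + st.2.1.length
     ≤ 2 * ((cellF n m) \ visFin n m v).card)

lemma dirStep_mono (n m : Int) (g : List (List Int)) (i j : Int)
    (st : ((Int × Int) → Bool) × List (Int × Int) × Int) (d : Int × Int) (c : Int × Int)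
    (hc : st.1 c = true) : (lakesDirStep n m g i j st d).1 c = true := by
  rw [dirStep_eq]
  split
  · split
    · simp only []
      split
      · rfl
      · exact hc
    · exact hc
  · exact hc

lemma dirStep_marks (n m : Int) (g : List (List Int)) (i j : Int)
    (st : ((Int × Int) → Bool) × List (Int × Int) × Int) (d : Int × Int)
    (hin : InB n m (i + d.1, j + d.2)) (hpos : 0 < gridAt g (i + d.1) (j + d.2)) :
    (lakesDirStep n m g i j st d).1 (i + d.1, j + d.2) = true := by
  rw [dirStep_eq]
  obtain ⟨h1, h2, h3, h4⟩ := hin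
  rw [if_pos ⟨h1, h2, h3, h4⟩]
  by_cases hv : st.1 (i + d.1, j + d.2) = false
  · rw [if_pos ⟨hv, hpos⟩]; simp
  · have : st.1 (i + d.1, j + d.2) = true := by
      revert hv; cases st.1 (i + d.1, j + d.2) <;> simp
    split
    · simp
    · exact this

lemma dirStep_DI (n m : Int) (g : List (List Int)) (s : Int × Int)
    (V0 v : (Int × Int) → Bool) (i j : Int)
    (hV0v : ∀ c, V0 c = true → v c = true)
    (hijP : PosC n m g (i, j)) (hijC : ConnC n m g s (i, j))
    (st : ((Int × Int) → Bool) × List (Int × Int) × Int) (d : Int × Int)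
    (hd : d ∈ lakesDirs) (hDI : DIb n m g s V0 v st) :
    DIb n m g s V0 v (lakesDirStep n m g i j st d) := by
  obtain ⟨hmono, hsub, hnew, hvol, hmeas⟩ := hDI
  rw [dirStep_eq]
  split
  case isFalse => exact ⟨hmono, hsub, hnew, hvol, hmeas⟩
  case isTrue hbnd =>
    split
    case isFalse => exact ⟨hmono, hsub, hnew, hvol, hmeas⟩
    case isTrue hcond =>
      obtain ⟨hunvis, hpos⟩ := hcond
      have hInB : InB n m (i + d.1, j + d.2) := hbnd
      have hPosE : PosC n m g (i + d.1, j + d.2) := ⟨hInB, hpos⟩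
      have hAdj : AdjC n m g (i, j) (i + d.1, j + d.2) := by
        refine ⟨hijP, hPosE, ?_⟩
        simp only [lakesDirs, List.mem_cons, List.not_mem_nil, or_false] at hd
        rcases hd with rfl | rfl | rfl | rfl <;> dsimp only
        · right; exact ⟨by omega, Or.inl (by omega)⟩
        · right; exact ⟨by omega, Or.inr (by omega)⟩
        · left; exact ⟨by omega, Or.inl (by omega)⟩
        · left; exact ⟨by omega, Or.inr (by omega)⟩
      have hConnE : ConnC n m g s (i + d.1, j + d.2) := Relation.ReflTransGen.tail hijC hAdj
      have hveq : visFin n m (fun c => if c = (i + d.1, j + d.2) then true else st.1 c)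
          = insert (i + d.1, j + d.2) (visFin n m st.1) := visFin_mark n m st.1 hInB
      have heNotVis : (i + d.1, j + d.2) ∉ visFin n m st.1 := by
        rw [mem_visFin]; rintro ⟨_, hh⟩; rw [hunvis] at hh; exact Bool.false_ne_true hh
      have heNotV0 : (i + d.1, j + d.2) ∉ visFin n m V0 := by
        rw [mem_visFin]; rintro ⟨_, hh⟩
        have := hmono _ (hV0v _ hh)
        rw [hunvis] at this; exact Bool.false_ne_true this
      have heCellF : (i + d.1, j + d.2) ∈ cellF n m := (mem_cellF n m _).mpr hInB
      refine ⟨?_, ?_, ?_, ?_, ?_⟩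
      · intro c hc
        simp only []
        split
        · rfl
        · exact hmono c hc
      · intro c hc
        simp only [] at hc
        by_cases hce : c = (i + d.1, j + d.2)
        · subst hce; right; simp
        · rw [if_neg hce] at hc
          rcases hsub c hc with h | h
          · exact Or.inl h
          · right; simp [h]
      · intro c hc
        simp only [List.mem_append, List.mem_singleton] at hc
        rcases hc with hc | rfl
        · obtain ⟨h1, h2, h3⟩ := hnew c hc
          refine ⟨?_, h2, h3⟩
          simp only []
          split
          · rfl
          · exact h1
        · refine ⟨?_, hPosE, hConnE⟩
          simp
      · simp only [hveq]
        rw [Finset.insert_sdiff_of_notMem _ heNotV0]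
        rw [Finset.sum_insert (by rw [Finset.mem_sdiff]; rintro ⟨h, _⟩; exact heNotVis h)]
        rw [hvol]; ring
      · simp only [hveq, List.length_append, List.length_singleton]
        rw [Finset.sdiff_insert]
        have hmem : (i + d.1, j + d.2) ∈ (cellF n m) \ visFin n m st.1 := by
          rw [Finset.mem_sdiff]; exact ⟨heCellF, heNotVis⟩
        rw [Finset.card_erase_of_mem hmem]
        have hge : 1 ≤ ((cellF n m) \ visFin n m st.1).card := Finset.card_pos.mpr ⟨_, hmem⟩
        omega

lemma dirFold_mono (n m : Int) (g : List (List Int)) (i j : Int) :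
    ∀ (ds : List (Int × Int)) (st : ((Int × Int) → Bool) × List (Int × Int) × Int)
      (c : Int × Int), st.1 c = true → (ds.foldl (lakesDirStep n m g i j) st).1 c = true := by
  intro ds
  induction ds with
  | nil => exact fun st c h => h
  | cons d t ih => exact fun st c h => ih _ c (dirStep_mono n m g i j st d c h)

lemma dirFold_spec (n m : Int) (g : List (List Int)) (s : Int × Int)
    (V0 v : (Int × Int) → Bool) (i j : Int)
    (hV0v : ∀ c, V0 c = true → v c = true)
    (hijP : PosC n m g (i, j)) (hijC : ConnC n m g s (i, j)) :
    ∀ (ds : List (Int × Int)), (∀ d ∈ ds, d ∈ lakesDirs) →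
    ∀ (st : ((Int × Int) → Bool) × List (Int × Int) × Int), DIb n m g s V0 v st →
      DIb n m g s V0 v (ds.foldl (lakesDirStep n m g i j) st) ∧
      (∀ d ∈ ds, InB n m (i + d.1, j + d.2) → 0 < gridAt g (i + d.1) (j + d.2) →
        (ds.foldl (lakesDirStep n m g i j) st).1 (i + d.1, j + d.2) = true) := by
  intro ds
  induction ds with
  | nil => exact fun _ st h => ⟨h, by simp⟩
  | cons d t ih =>
    intro hds st hDI
    have hd : d ∈ lakesDirs := hds d (by simp)
    have hDI' := dirStep_DI n m g s V0 v i j hV0v hijP hijC st d hd hDI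
    obtain ⟨hres, hcov⟩ := ih (fun x hx => hds x (by simp [hx])) _ hDI'
    refine ⟨hres, ?_⟩
    intro dd hdd hin hpos
    rcases List.mem_cons.mp hdd with rfl | hdd'
    · exact dirFold_mono n m g i j t _ _ (dirStep_marks n m g i j st dd hin hpos)
    · exact hcov dd hdd' hin hpos

theorem bfs_main (n m : Int) (g : List (List Int)) (s : Int × Int)
    (V0 : (Int × Int) → Bool)
    (hdis : ∀ c, V0 c = true → ¬ ConnC n m g s c)
    (hsP : PosC n m g s) :
    ∀ (fuel : Nat) (q : List (Int × Int)) (v : (Int × Int) → Bool) (vol : Int),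
      (∀ c ∈ q, v c = true ∧ ConnC n m g s c) →
      (∀ c, v c = true → V0 c = true ∨ (PosC n m g c ∧ ConnC n m g s c)) →
      v s = true →
      (∀ c, V0 c = true → v c = true) →
      (∀ c, v c = true → c ∉ q → V0 c = false → ∀ d, AdjC n m g c d → v d = true) →
      vol = ∑ c ∈ (visFin n m v \ visFin n m V0), gridAt g c.1 c.2 →
      2 * ((cellF n m) \ visFin n m v).card + q.length < fuel →
      (lakesBfs n m g fuel q v vol).2 = compVol n m g s ∧
      (∀ c, (lakesBfs n m g fuel q v vol).1 c = true ↔ (V0 c = true ∨ ConnC n m g s c)) := by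
  intro fuel
  induction fuel with
  | zero => intro q v vol _ _ _ _ _ _ hfuel; omega
  | succ f ih =>
    intro q v vol hq hvsub hvs hV0v hcl hvol hfuel
    match q with
    | [] =>
      have hreach : ∀ c, ConnC n m g s c → v c = true := by
        intro c hc
        induction hc with
        | refl => exact hvs
        | tail hst hadj ihh =>
          rename_i b cc
          have hvb : v b = true := ihh
          have hV0b : V0 b = false := by
            cases hb : V0 b
            · rfl
            · exact absurd hst (hdis b hb)
          exact hcl b hvb (by simp) hV0b cc hadj
      have hset : visFin n m v \ visFin n m V0 = compF n m g s := by
        ext c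
        rw [Finset.mem_sdiff, mem_visFin, mem_visFin, mem_compF, mem_cellF]
        constructor
        · rintro ⟨⟨hi, hv⟩, hnot⟩
          refine ⟨hi, ?_⟩
          rcases hvsub c hv with h | h
          · exact absurd ⟨hi, h⟩ hnot
          · exact h.2
        · rintro ⟨hi, hconn⟩
          refine ⟨⟨hi, hreach c hconn⟩, ?_⟩
          rintro ⟨_, hV0⟩
          exact hdis c hV0 hconn
      constructor
      · show vol = compVol n m g s
        rw [hvol, hset]; rfl
      · intro c
        show v c = true ↔ _
        constructor
        · intro hv
          rcases hvsub c hv with h | h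
          · exact Or.inl h
          · exact Or.inr h.2
        · rintro (h | h)
          · exact hV0v c h
          · exact hreach c h
    | (i, j) :: rest =>
      have hij := hq (i, j) (by simp)
      have hijP : PosC n m g (i, j) := connC_pos n m g hsP hij.2
      have hDI0 : DIb n m g s V0 v (v, [], vol) :=
        ⟨fun c h => h, fun c h => Or.inl h, by simp, hvol, by simp⟩
      obtain ⟨hDI, hcov⟩ := dirFold_spec n m g s V0 v i j hV0v hijP hij.2 lakesDirs
        (fun d hd => hd) _ hDI0
      obtain ⟨hmono, hsub, hnew, hvolS, hmeas⟩ := hDI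
      have heq : lakesBfs n m g (f + 1) ((i, j) :: rest) v vol
          = lakesBfs n m g f (rest ++ (lakesDirs.foldl (lakesDirStep n m g i j) (v, [], vol)).2.1)
              (lakesDirs.foldl (lakesDirStep n m g i j) (v, [], vol)).1
              (lakesDirs.foldl (lakesDirStep n m g i j) (v, [], vol)).2.2 := rfl
      rw [heq]
      set st := lakesDirs.foldl (lakesDirStep n m g i j) (v, [], vol) with hst
      apply ih
      · intro c hc
        rcases List.mem_append.mp hc with h | h
        · exact ⟨hmono c (hq c (by simp [h])).1, (hq c (by simp [h])).2⟩
        · exact ⟨(hnew c h).1, (hnew c h).2.2⟩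
      · intro c hc
        rcases hsub c hc with h | h
        · exact hvsub c h
        · exact Or.inr ⟨(hnew c h).2.1, (hnew c h).2.2⟩
      · exact hmono s hvs
      · exact fun c h => hmono c (hV0v c h)
      · intro c hc hnq hV0c d hd
        by_cases hcij : c = (i, j)
        · subst hcij
          obtain ⟨dd, hdd, rfl⟩ := adj_dir n m g hd
          exact hcov dd hdd hd.2.1.1 hd.2.1.2
        · have hvc : v c = true := by
            rcases hsub c hc with h | h
            · exact h
            · exact absurd (List.mem_append.mpr (Or.inr h)) hnq
          have : c ∉ (i, j) :: rest := by
            intro hmem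
            rcases List.mem_cons.mp hmem with h | h
            · exact hcij h
            · exact hnq (List.mem_append.mpr (Or.inl h))
          exact hmono d (hcl c hvc this hV0c d hd)
      · exact hvolS
      · have h1 : (rest ++ st.2.1).length = rest.length + st.2.1.length := List.length_append ..
        have h2 : ((i, j) :: rest).length = rest.length + 1 := by simp
        omega

theorem bfsRun_spec (n m : Int) (g : List (List Int)) (s : Int × Int) (v : (Int × Int) → Bool)
    (hCl : ∀ c d, v c = true → AdjC n m g c d → v d = true)
    (hsP : PosC n m g s) (hsv : v s = false) :
    (lakesBfsRun n m g s.1 s.2 v).2 = compVol n m g s ∧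
    (∀ c, (lakesBfsRun n m g s.1 s.2 v).1 c = true ↔ (v c = true ∨ ConnC n m g s c)) := by
  have hdis : ∀ c, v c = true → ¬ ConnC n m g s c := closed_not_conn n m g v hCl hsv
  have hseed : ((s.1, s.2) : Int × Int) = s := rfl
  have happ := bfs_main n m g s v hdis hsP (2 * (n * m).toNat + 2) [s]
    (fun c => if c = s then true else v c) (gridAt g s.1 s.2)
    (by intro c hc; simp at hc; subst hc; exact ⟨by simp, Relation.ReflTransGen.refl⟩)
    (by
      intro c hc
      have hc' : (if c = s then true else v c) = true := hc
      by_cases hcs : c = s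
      · subst hcs; exact Or.inr ⟨hsP, Relation.ReflTransGen.refl⟩
      · rw [if_neg hcs] at hc'; exact Or.inl hc')
    (by simp)
    (by
      intro c hc
      by_cases hcs : c = s
      · simp [hcs]
      · simp [hcs, hc])
    (by
      intro c hc hnq hV0c d hd
      have hc' : (if c = s then true else v c) = true := hc
      by_cases hcs : c = s
      · exact absurd (by simp [hcs]) hnq
      · rw [if_neg hcs] at hc'; rw [hc'] at hV0c; exact absurd hV0c (by simp))
    (by
      have hset : visFin n m (fun c => if c = s then true else v c) \ visFin n m v = {s} := by
        rw [visFin_mark n m v hsP.1, Finset.insert_sdiff_of_notMem _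
          (by rw [mem_visFin]; rintro ⟨_, h⟩; rw [hsv] at h; exact Bool.false_ne_true h)]
        rw [Finset.sdiff_self]
        simp
      rw [hset, Finset.sum_singleton])
    (by
      have h1 : ((cellF n m) \ visFin n m (fun c => if c = s then true else v c)).card
          ≤ (cellF n m).card := Finset.card_le_card (Finset.sdiff_subset)
      have h2 : (cellF n m).card ≤ (cellsL n m).length := List.toFinset_card_le _
      have h3 := cellsL_length_le n m
      simp only [List.length_cons, List.length_nil]
      omega)
  exact happ

-- A's scan over the grid: running maximum of component volumes
theorem outer_fold (n m : Int) (g : List (List Int)) :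
    ∀ (l : List (Int × Int)), (∀ c ∈ l, InB n m c) →
    ∀ (v : (Int × Int) → Bool) (mx : Int),
      (∀ c d, v c = true → AdjC n m g c d → v d = true) →
      (∀ c, v c = true → compVol n m g c ≤ mx) →
      (l.foldl (fun (st : ((Int × Int) → Bool) × Int) c =>
          if gridAt g c.1 c.2 > 0 ∧ st.1 c = false then
            (  (lakesBfsRun n m g c.1 c.2 st.1).1,
               max st.2 (lakesBfsRun n m g c.1 c.2 st.1).2 )
          else st) (v, mx)).2
      = l.foldl (fun a c => if 0 < gridAt g c.1 c.2 then max a (compVol n m g c) else a) mx := by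
  intro l
  induction l with
  | nil => intro _ v mx _ _; rfl
  | cons c t ih =>
    intro hin v mx hCl hmx
    have hcIn : InB n m c := hin c (by simp)
    simp only [List.foldl_cons]
    by_cases hp : 0 < gridAt g c.1 c.2
    · by_cases hv : v c = true
      · rw [if_neg (by rw [hv]; rintro ⟨_, h⟩; simp at h)]
        rw [if_pos hp]
        rw [max_eq_left (hmx c hv)]
        exact ih (fun x hx => hin x (by simp [hx])) v mx hCl hmx
      · have hvF : v c = false := by cases h : v c; rfl; exact absurd h hv
        rw [if_pos ⟨hp, hvF⟩]
        have hPosc : PosC n m g c := ⟨hcIn, hp⟩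
        obtain ⟨hvol, hchar⟩ := bfsRun_spec n m g c v hCl hPosc hvF
        rw [if_pos hp]
        rw [hvol]
        apply ih (fun x hx => hin x (by simp [hx]))
        · intro x d hx hadj
          rcases (hchar x).mp hx with h | h
          · exact (hchar d).mpr (Or.inl (hCl x d h hadj))
          · exact (hchar d).mpr (Or.inr (Relation.ReflTransGen.tail h hadj))
        · intro x hx
          rcases (hchar x).mp hx with h | h
          · exact le_trans (hmx x h) (le_max_left _ _)
          · rw [← compVol_class_eq n m g h]
            exact le_max_right _ _
    · rw [if_neg (by rintro ⟨h, _⟩; exact hp h), if_neg hp]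
      exact ih (fun x hx => hin x (by simp [hx])) v mx hCl hmx

noncomputable def AmaxL (n m : Int) (g : List (List Int)) : Int :=
  (cellsL n m).foldl (fun a c => if 0 < gridAt g c.1 c.2 then max a (compVol n m g c) else a) 0

theorem lakesCase_eq (c : Int × Int × List (List Int)) :
    lakesCase c = AmaxL c.1 c.2.1 c.2.2 := by
  obtain ⟨n, m, g⟩ := c
  show ((PySem.List.pyRange 0 n 1).foldl (fun st i =>
      (PySem.List.pyRange 0 m 1).foldl (fun (st : ((Int × Int) → Bool) × Int) j =>
        if gridAt g i j > 0 ∧ st.1 (i, j) = false then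
          let r := lakesBfsRun n m g i j st.1
          (r.1, max st.2 r.2)
        else st) st) ((fun _ => false), 0)).2 = AmaxL n m g
  rw [foldl_nested n m (fun (st : ((Int × Int) → Bool) × Int) i j =>
        if gridAt g i j > 0 ∧ st.1 (i, j) = false then
          ((lakesBfsRun n m g i j st.1).1, max st.2 (lakesBfsRun n m g i j st.1).2)
        else st) ((fun _ => false), 0)]
  have := outer_fold n m g (cellsL n m) (fun x hx => (mem_cellsL n m x).mp hx)
    (fun _ => false) 0 (by intro _ _ h; exact absurd h (by simp)) (by intro _ h; exact absurd h (by simp))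
  unfold AmaxL
  convert this using 2

-- ---------- B side: union-find theory ----------

def NRc (NM : Nat) (p : Int → Int) : Nat :=
  (List.range NM).countP (fun (i : Nat) => decide (p (i : Int) ≠ (i : Int)))

-- invariant of the parent map: identity off [0, NM), range-closed on it, and
-- every parent chain reaches a root within NRc steps
def UFInv (NM : Nat) (p : Int → Int) : Prop :=
  (∀ x : Int, (x < 0 ∨ (NM : Int) ≤ x) → p x = x) ∧
  (∀ x : Int, 0 ≤ x → x < (NM : Int) → 0 ≤ p x ∧ p x < (NM : Int)) ∧
  (∀ x : Int, p (p^[NRc NM p] x) = p^[NRc NM p] x)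

def rootP (NM : Nat) (p : Int → Int) (x : Int) : Int := p^[NM] x

lemma NRc_le (NM : Nat) (p : Int → Int) : NRc NM p ≤ NM :=
  le_trans List.countP_le_length (by simp)

lemma iter_stab (p : Int → Int) {y : Int} (h : p y = y) (k : Nat) : p^[k] y = y :=
  Function.iterate_fixed h k

lemma iter_reach {p : Int → Int} {k K : Nat} {x : Int}
    (h : p (p^[k] x) = p^[k] x) (hkK : k ≤ K) : p^[K] x = p^[k] x := by
  obtain ⟨d, rfl⟩ := Nat.exists_eq_add_of_le hkK
  rw [Nat.add_comm, Function.iterate_add_apply]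
  exact iter_stab p h d

lemma rootP_eq_iterNR (NM : Nat) (p : Int → Int)
    (h3 : ∀ x : Int, p (p^[NRc NM p] x) = p^[NRc NM p] x) (x : Int) :
    rootP NM p x = p^[NRc NM p] x :=
  iter_reach (h3 x) (NRc_le NM p)

lemma rootP_isRoot (NM : Nat) (p : Int → Int)
    (h3 : ∀ x : Int, p (p^[NRc NM p] x) = p^[NRc NM p] x) (x : Int) :
    p (rootP NM p x) = rootP NM p x := by
  rw [rootP_eq_iterNR NM p h3 x]; exact h3 x

lemma iter_range (NM : Nat) (p : Int → Int)
    (h2 : ∀ x : Int, 0 ≤ x → x < (NM : Int) → 0 ≤ p x ∧ p x < (NM : Int)) (k : Nat) (x : Int)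
    (hx : 0 ≤ x ∧ x < (NM : Int)) : 0 ≤ p^[k] x ∧ p^[k] x < (NM : Int) := by
  induction k with
  | zero => simpa using hx
  | succ k ih =>
    rw [Function.iterate_succ_apply' p k x]
    exact h2 _ ih.1 ih.2

lemma rootP_range (NM : Nat) (p : Int → Int)
    (h2 : ∀ x : Int, 0 ≤ x → x < (NM : Int) → 0 ≤ p x ∧ p x < (NM : Int)) (x : Int)
    (hx : 0 ≤ x ∧ x < (NM : Int)) : 0 ≤ rootP NM p x ∧ rootP NM p x < (NM : Int) :=
  iter_range NM p h2 NM x hx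

lemma ufFind_of_reach (p : Int → Int) :
    ∀ (f k : Nat) (x : Int), k < f → p (p^[k] x) = p^[k] x → ufFind p f x = p^[k] x := by
  intro f
  induction f with
  | zero => omega
  | succ f ih =>
    intro k x hk hroot
    rw [show ufFind p (f + 1) x = if p x = x then x else ufFind p f (p x) from rfl]
    by_cases hx : p x = x
    · rw [if_pos hx, iter_stab p hx k]
    · rw [if_neg hx]
      cases k with
      | zero => simp only [Function.iterate_zero, id_eq] at hroot; exact absurd hroot hx
      | succ k =>
        have hs : p^[k + 1] x = p^[k] (p x) := Function.iterate_succ_apply p k x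
        rw [hs] at hroot ⊢
        exact ih k (p x) (by omega) hroot

lemma ufFind_eq_rootP (NM : Nat) (p : Int → Int) (hInv : UFInv NM p) (x : Int) :
    ufFind p (NM + 1) x = rootP NM p x := by
  obtain ⟨_, _, h3⟩ := hInv
  rw [ufFind_of_reach p (NM + 1) (NRc NM p) x (by have := NRc_le NM p; omega) (h3 x)]
  exact (rootP_eq_iterNR NM p h3 x).symm

lemma chain_transfer (p : Int → Int) (ra rb : Int) (hra : p ra = ra) (hrb : p rb = rb)
    (hne : ra ≠ rb) :
    ∀ (k : Nat) (x : Int), p (p^[k] x) = p^[k] x →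
      ((fun y => if y = ra then rb else p y)^[k + 1] x
          = (if p^[k] x = ra then rb else p^[k] x)) ∧
      ((fun y => if y = ra then rb else p y) ((fun y => if y = ra then rb else p y)^[k + 1] x)
          = (fun y => if y = ra then rb else p y)^[k + 1] x) := by
  set p' := fun y => if y = ra then rb else p y with hp'
  have hp'rb : p' rb = rb := by
    show (if rb = ra then rb else p rb) = rb
    rw [if_neg (Ne.symm hne)]; exact hrb
  have hp'ra : p' ra = rb := by
    show (if ra = ra then rb else p ra) = rb
    exact if_pos rfl
  intro k
  induction k with
  | zero =>
    intro x hroot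
    simp only [Function.iterate_zero, id_eq] at hroot ⊢
    by_cases hx : x = ra
    · subst hx
      rw [if_pos rfl]
      constructor
      · rw [Function.iterate_one, hp'ra]
      · rw [Function.iterate_one, hp'ra, hp'rb]
    · rw [if_neg hx]
      have hp'x : p' x = x := by
        show (if x = ra then rb else p x) = x
        rw [if_neg hx]; exact hroot
      constructor
      · rw [Function.iterate_one, hp'x]
      · rw [Function.iterate_one, hp'x, hp'x]
  | succ k ih =>
    intro x hroot
    by_cases hpx : p x = x
    · have hxk : p^[k + 1] x = x := iter_stab p hpx (k + 1)
      rw [hxk]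
      by_cases hx : x = ra
      · subst hx
        rw [if_pos rfl]
        have hiter : p'^[k + 1 + 1] x = rb := by
          rw [Function.iterate_succ_apply p' (k + 1) x, hp'ra, iter_stab p' hp'rb (k + 1)]
        exact ⟨hiter, by rw [hiter, hp'rb]⟩
      · rw [if_neg hx]
        have hp'x : p' x = x := by
          show (if x = ra then rb else p x) = x
          rw [if_neg hx]; exact hpx
        have hiter : p'^[k + 1 + 1] x = x := iter_stab p' hp'x (k + 2)
        exact ⟨hiter, by rw [hiter, hp'x]⟩
    · have hxra : x ≠ ra := fun h => hpx (by rw [h, hra])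
      have h1 : p^[k + 1] x = p^[k] (p x) := Function.iterate_succ_apply p k x
      have hroot' : p (p^[k] (p x)) = p^[k] (p x) := by rw [← h1]; exact hroot
      obtain ⟨ihA, ihB⟩ := ih (p x) hroot'
      have hp'x : p' x = p x := by
        show (if x = ra then rb else p x) = p x
        rw [if_neg hxra]
      have hstep : p'^[k + 1 + 1] x = p'^[k + 1] (p x) := by
        rw [Function.iterate_succ_apply p' (k + 1) x, hp'x]
      constructor
      · rw [hstep, ihA, h1]
      · rw [hstep]; exact ihB

lemma NRc_lt (NM : Nat) (p : Int → Int) {ra : Int} (hra : p ra = ra)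
    (hraR : 0 ≤ ra ∧ ra < (NM : Int)) : NRc NM p < NM := by
  have hmem : ra.toNat ∈ List.range NM := by
    rw [List.mem_range]; omega
  have hperm : (List.range NM).Perm (ra.toNat :: (List.range NM).erase ra.toNat) :=
    List.perm_cons_erase hmem
  unfold NRc
  rw [hperm.countP_eq]
  rw [List.countP_cons]
  have hfalse : (decide (p ((ra.toNat : Nat) : Int) ≠ ((ra.toNat : Nat) : Int))) = false := by
    have : (ra.toNat : Int) = ra := Int.toNat_of_nonneg hraR.1
    rw [this]; simp [hra]
  rw [hfalse]
  simp only [Bool.false_eq_true, if_false]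
  have hlen : ((List.range NM).erase ra.toNat).length = NM - 1 := by
    rw [List.length_erase_of_mem hmem, List.length_range]
  have hcle := List.countP_le_length (l := (List.range NM).erase ra.toNat)
    (p := fun (i : Nat) => decide (p (i : Int) ≠ (i : Int)))
  have hNM : 1 ≤ NM := by omega
  omega

lemma NRc_update_ge (NM : Nat) (p : Int → Int) {ra rb : Int} (hra : p ra = ra)
    (hne : ra ≠ rb) (hraR : 0 ≤ ra ∧ ra < (NM : Int)) :
    NRc NM p + 1 ≤ NRc NM (fun y => if y = ra then rb else p y) := by
  have hmem : ra.toNat ∈ List.range NM := by rw [List.mem_range]; omega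
  have hperm : (List.range NM).Perm (ra.toNat :: (List.range NM).erase ra.toNat) :=
    List.perm_cons_erase hmem
  have hcast : (ra.toNat : Int) = ra := Int.toNat_of_nonneg hraR.1
  unfold NRc
  rw [hperm.countP_eq, hperm.countP_eq, List.countP_cons, List.countP_cons]
  have h1 : (decide (p (ra.toNat : Int) ≠ (ra.toNat : Int))) = false := by
    rw [hcast]; simp [hra]
  have h2 : (decide ((fun y => if y = ra then rb else p y) (ra.toNat : Int) ≠ (ra.toNat : Int))) = true := by
    rw [hcast]
    show decide ((if ra = ra then rb else p ra) ≠ ra) = true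
    rw [if_pos rfl]
    exact decide_eq_true (Ne.symm hne)

  have h3 : ((List.range NM).erase ra.toNat).countP (fun (i : Nat) => decide (p (i : Int) ≠ (i : Int)))
      ≤ ((List.range NM).erase ra.toNat).countP
          (fun (i : Nat) => decide ((fun y => if y = ra then rb else p y) (i : Int) ≠ (i : Int))) := by
    apply le_of_eq
    apply List.countP_congr
    intro b hb
    have hbne : b ≠ ra.toNat := ((List.nodup_range).mem_erase_iff.mp hb).1
    have : (b : Int) ≠ ra := by omega
    simp only [if_neg this]
  rw [h1, h2]
  simp only [Bool.false_eq_true, if_false, if_true]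
  have hbb : (List.countP (fun (i : Nat) => decide ((fun y => if y = ra then rb else p y) (i : Int) ≠ (i : Int)))
        ((List.range NM).erase ra.toNat))
      = (List.countP (fun (i : Nat) => decide ((if (i : Int) = ra then rb else p (i : Int)) ≠ (i : Int)))
        ((List.range NM).erase ra.toNat)) := rfl
  rw [hbb]
  omega

lemma update_rootP (NM : Nat) (p : Int → Int) (hInv : UFInv NM p)
    (ra rb : Int) (hra : p ra = ra) (hrb : p rb = rb) (hne : ra ≠ rb)
    (hraR : 0 ≤ ra ∧ ra < (NM : Int)) (hrbR : 0 ≤ rb ∧ rb < (NM : Int)) :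
    UFInv NM (fun y => if y = ra then rb else p y) ∧
    (∀ x, rootP NM (fun y => if y = ra then rb else p y) x
        = if rootP NM p x = ra then rb else rootP NM p x) := by
  obtain ⟨h1, h2, h3⟩ := hInv
  have key := fun x => chain_transfer p ra rb hra hrb hne (NRc NM p) x (h3 x)
  have hNRlt : NRc NM p < NM := NRc_lt NM p hra hraR
  have hNR' : NRc NM p + 1 ≤ NRc NM (fun y => if y = ra then rb else p y) :=
    NRc_update_ge NM p hra hne hraR
  have hform : ∀ x, (fun y => if y = ra then rb else p y)^[NRc NM p + 1] x
      = (if p^[NRc NM p] x = ra then rb else p^[NRc NM p] x) := fun x => (key x).1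
  have hroot' : ∀ x, (fun y => if y = ra then rb else p y)
        ((fun y => if y = ra then rb else p y)^[NRc NM p + 1] x)
      = (fun y => if y = ra then rb else p y)^[NRc NM p + 1] x := fun x => (key x).2
  have hrootBig : ∀ x, rootP NM (fun y => if y = ra then rb else p y) x
      = (fun y => if y = ra then rb else p y)^[NRc NM p + 1] x := by
    intro x
    exact iter_reach (hroot' x) (by omega)
  refine ⟨⟨?_, ?_, ?_⟩, ?_⟩
  · intro x hx
    have hxra : x ≠ ra := by rintro rfl; omega
    show (if x = ra then rb else p x) = x
    rw [if_neg hxra]; exact h1 x hx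
  · intro x h0 hN
    show 0 ≤ (if x = ra then rb else p x) ∧ (if x = ra then rb else p x) < (NM : Int)
    by_cases hx : x = ra
    · rw [if_pos hx]; exact hrbR
    · rw [if_neg hx]; exact h2 x h0 hN
  · intro x
    have hr := hroot' x
    have : (fun y => if y = ra then rb else p y)^[NRc NM (fun y => if y = ra then rb else p y)] x
        = (fun y => if y = ra then rb else p y)^[NRc NM p + 1] x := iter_reach hr hNR'
    rw [this]; exact hr
  · intro x
    rw [hrootBig x, hform x, rootP_eq_iterNR NM p h3 x]

lemma ufUnion_spec (NM : Nat) (p : Int → Int) (a b : Int) (hInv : UFInv NM p)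
    (ha : 0 ≤ a ∧ a < (NM : Int)) (hb : 0 ≤ b ∧ b < (NM : Int)) :
    UFInv NM (ufUnion p (NM + 1) a b) ∧
    (∀ x y, rootP NM p x = rootP NM p y →
        rootP NM (ufUnion p (NM + 1) a b) x = rootP NM (ufUnion p (NM + 1) a b) y) ∧
    rootP NM (ufUnion p (NM + 1) a b) a = rootP NM (ufUnion p (NM + 1) a b) b ∧
    (∀ x, ufUnion p (NM + 1) a b x = p x ∨
        (x = rootP NM p a ∧ ufUnion p (NM + 1) a b x = rootP NM p b)) := by
  obtain ⟨h1, h2, h3⟩ := hInv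
  have hugen : ufUnion p (NM + 1) a b
      = if rootP NM p a = rootP NM p b then p
        else fun x => if x = rootP NM p a then rootP NM p b else p x := by
    unfold ufUnion
    rw [ufFind_eq_rootP NM p ⟨h1, h2, h3⟩ a, ufFind_eq_rootP NM p ⟨h1, h2, h3⟩ b]
  by_cases hrr : rootP NM p a = rootP NM p b
  · rw [hugen, if_pos hrr]
    exact ⟨⟨h1, h2, h3⟩, fun x y h => h, hrr, fun x => Or.inl rfl⟩
  · rw [hugen, if_neg hrr]
    have hraRoot : p (rootP NM p a) = rootP NM p a := rootP_isRoot NM p h3 a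
    have hrbRoot : p (rootP NM p b) = rootP NM p b := rootP_isRoot NM p h3 b
    have hraR : 0 ≤ rootP NM p a ∧ rootP NM p a < (NM : Int) := rootP_range NM p h2 a ha
    have hrbR : 0 ≤ rootP NM p b ∧ rootP NM p b < (NM : Int) := rootP_range NM p h2 b hb
    obtain ⟨hInv', hform⟩ := update_rootP NM p ⟨h1, h2, h3⟩ (rootP NM p a) (rootP NM p b)
      hraRoot hrbRoot hrr hraR hrbR
    refine ⟨hInv', ?_, ?_, ?_⟩
    · intro x y h; rw [hform x, hform y, h]
    · rw [hform a, hform b]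
      rw [if_pos rfl, if_neg (Ne.symm hrr)]
    · intro x
      by_cases hx : x = rootP NM p a
      · exact Or.inr ⟨hx, by rw [if_pos hx]⟩
      · exact Or.inl (by rw [if_neg hx])

-- ---------- B side: edges of the grid and their equivalence closure ----------

def encl (m : Int) (c : Int × Int) : Int := c.1 * m + c.2

def edgesOf (n m : Int) (g : List (List Int)) (c : Int × Int) : List (Int × Int) :=
  (if gridAt g c.1 c.2 > 0 ∧ c.1 + 1 < n ∧ gridAt g (c.1 + 1) c.2 > 0
    then [(c.1 * m + c.2, (c.1 + 1) * m + c.2)] else []) ++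
  (if gridAt g c.1 c.2 > 0 ∧ c.2 + 1 < m ∧ gridAt g c.1 (c.2 + 1) > 0
    then [(c.1 * m + c.2, c.1 * m + c.2 + 1)] else [])

def allE (n m : Int) (g : List (List Int)) : List (Int × Int) :=
  (cellsL n m).flatMap (edgesOf n m g)

def ERel (n m : Int) (g : List (List Int)) (x y : Int) : Prop := (x, y) ∈ allE n m g

def CAe (n m : Int) (g : List (List Int)) : Int → Int → Prop :=
  Relation.EqvGen (ERel n m g)

lemma encl_range (n m : Int) {c : Int × Int} (h : InB n m c) :
    0 ≤ encl m c ∧ encl m c < n * m := by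
  obtain ⟨h1, h2, h3, h4⟩ := h
  unfold encl
  constructor
  · have : 0 ≤ c.1 * m := mul_nonneg h1 (by omega)
    omega
  · have e1 : c.1 * m + c.2 < c.1 * m + m := by omega
    have e2 : c.1 * m + m = (c.1 + 1) * m := by ring
    have e3 : (c.1 + 1) * m ≤ n * m := mul_le_mul_of_nonneg_right (by omega) (by omega)
    omega

lemma encl_inj (n m : Int) {c d : Int × Int} (hc : InB n m c) (hd : InB n m d)
    (h : encl m c = encl m d) : c = d := by
  obtain ⟨hc1, hc2, hc3, hc4⟩ := hc
  obtain ⟨hd1, hd2, hd3, hd4⟩ := hd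
  unfold encl at h
  have e1 : c.1 * m + c.2 = c.2 + m * c.1 := by ring
  have e2 : d.1 * m + d.2 = d.2 + m * d.1 := by ring
  rw [e1, e2] at h
  have h2 : (c.2 + m * c.1) % m = (d.2 + m * d.1) % m := by rw [h]
  rw [Int.add_mul_emod_self_left, Int.add_mul_emod_self_left] at h2
  rw [Int.emod_eq_of_lt hc3 hc4, Int.emod_eq_of_lt hd3 hd4] at h2
  have h1 : c.1 = d.1 := by
    have hmm : c.1 * m = d.1 * m := by omega
    exact mul_right_cancel₀ (by omega) hmm
  exact Prod.ext_iff.mpr ⟨h1, h2⟩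

lemma edge_endpoints (n m : Int) (g : List (List Int)) {e : Int × Int}
    (he : e ∈ allE n m g) :
    ∃ c d, PosC n m g c ∧ PosC n m g d ∧ AdjC n m g c d ∧ e = (encl m c, encl m d) := by
  unfold allE at he
  obtain ⟨c, hcL, hce⟩ := List.mem_flatMap.mp he
  have hcIn : InB n m c := (mem_cellsL n m c).mp hcL
  unfold edgesOf at hce
  rcases List.mem_append.mp hce with h | h
  · split at h
    case isTrue hcond =>
      obtain ⟨hpc, hlt, hpd⟩ := hcond
      rcases List.mem_singleton.mp h with rfl
      have hPc : PosC n m g c := ⟨hcIn, hpc⟩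
      have hPd : PosC n m g (c.1 + 1, c.2) := ⟨⟨by omega, by omega, by omega, by omega⟩, hpd⟩
      exact ⟨c, (c.1 + 1, c.2), hPc, hPd,
        ⟨hPc, hPd, Or.inr ⟨rfl, Or.inr rfl⟩⟩, rfl⟩
    case isFalse => exact absurd h (List.not_mem_nil)
  · split at h
    case isTrue hcond =>
      obtain ⟨hpc, hlt, hpd⟩ := hcond
      rcases List.mem_singleton.mp h with rfl
      have hPc : PosC n m g c := ⟨hcIn, hpc⟩
      have hPd : PosC n m g (c.1, c.2 + 1) := ⟨⟨by omega, by omega, by omega, by omega⟩, hpd⟩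
      refine ⟨c, (c.1, c.2 + 1), hPc, hPd,
        ⟨hPc, hPd, Or.inl ⟨rfl, Or.inr rfl⟩⟩, ?_⟩
      show (c.1 * m + c.2, c.1 * m + c.2 + 1) = (encl m c, encl m (c.1, c.2 + 1))
      unfold encl
      rw [Prod.ext_iff]
      constructor
      · rfl
      · show c.1 * m + c.2 + 1 = c.1 * m + (c.2 + 1)
        omega
    case isFalse => exact absurd h (List.not_mem_nil)

lemma adj_edge (n m : Int) (g : List (List Int)) {c d : Int × Int} (h : AdjC n m g c d) :
    (encl m c, encl m d) ∈ allE n m g ∨ (encl m d, encl m c) ∈ allE n m g := by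
  obtain ⟨hPc, hPd, hgeo⟩ := h
  have hcL : c ∈ cellsL n m := (mem_cellsL n m c).mpr hPc.1
  have hdL : d ∈ cellsL n m := (mem_cellsL n m d).mpr hPd.1
  rcases hgeo with ⟨h1, h2 | h2⟩ | ⟨h1, h2 | h2⟩
  · -- c.1 = d.1, c.2 = d.2 + 1 : edge (d, c) listed at d
    right
    refine List.mem_flatMap.mpr ⟨d, hdL, ?_⟩
    unfold edgesOf
    refine List.mem_append.mpr (Or.inr ?_)
    rw [if_pos ⟨hPd.2, by omega, by rw [show (d.2 + 1) = c.2 from by omega, show d.1 = c.1 from by omega]; exact hPc.2⟩]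
    have hmm : d.1 * m = c.1 * m := by rw [h1]
    rw [List.mem_singleton, Prod.ext_iff]
    exact ⟨(by show encl m d = d.1 * m + d.2; rfl),
           (by show encl m c = d.1 * m + d.2 + 1; unfold encl; omega)⟩
  · -- c.1 = d.1, d.2 = c.2 + 1 : edge (c, d) listed at c
    left
    refine List.mem_flatMap.mpr ⟨c, hcL, ?_⟩
    unfold edgesOf
    refine List.mem_append.mpr (Or.inr ?_)
    rw [if_pos ⟨hPc.2, by omega, by rw [show (c.2 + 1) = d.2 from by omega, show c.1 = d.1 from h1]; exact hPd.2⟩]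
    have hmm : d.1 * m = c.1 * m := by rw [h1]
    rw [List.mem_singleton, Prod.ext_iff]
    exact ⟨rfl, by show encl m d = c.1 * m + c.2 + 1; unfold encl; omega⟩
  · -- c.2 = d.2, c.1 = d.1 + 1 : edge (d, c) listed at d
    right
    refine List.mem_flatMap.mpr ⟨d, hdL, ?_⟩
    unfold edgesOf
    refine List.mem_append.mpr (Or.inl ?_)
    rw [if_pos ⟨hPd.2, by omega, by rw [show (d.1 + 1) = c.1 from by omega, show d.2 = c.2 from by omega]; exact hPc.2⟩]
    have hmm : c.1 * m = (d.1 + 1) * m := by rw [show c.1 = d.1 + 1 from by omega]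
    have hmm2 : (d.1 + 1) * m = d.1 * m + m := by ring
    rw [List.mem_singleton, Prod.ext_iff]
    exact ⟨rfl, by show encl m c = (d.1 + 1) * m + d.2; unfold encl; omega⟩
  · -- c.2 = d.2, d.1 = c.1 + 1 : edge (c, d) listed at c
    left
    refine List.mem_flatMap.mpr ⟨c, hcL, ?_⟩
    unfold edgesOf
    refine List.mem_append.mpr (Or.inl ?_)
    rw [if_pos ⟨hPc.2, by omega, by rw [show (c.1 + 1) = d.1 from by omega, show c.2 = d.2 from h1]; exact hPd.2⟩]
    have hmm : d.1 * m = (c.1 + 1) * m := by rw [show d.1 = c.1 + 1 from by omega]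
    have hmm2 : (c.1 + 1) * m = c.1 * m + m := by ring
    rw [List.mem_singleton, Prod.ext_iff]
    exact ⟨rfl, by show encl m d = (c.1 + 1) * m + c.2; unfold encl; omega⟩

lemma edge_range (n m : Int) (g : List (List Int)) {e : Int × Int} (he : e ∈ allE n m g) :
    (0 ≤ e.1 ∧ e.1 < ((n * m).toNat : Int)) ∧ (0 ≤ e.2 ∧ e.2 < ((n * m).toNat : Int)) := by
  obtain ⟨c, d, hPc, hPd, _, rfl⟩ := edge_endpoints n m g he
  have h1 := encl_range n m hPc.1
  have h2 := encl_range n m hPd.1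
  have hmn : 0 < n * m := by
    obtain ⟨a1, a2, a3, a4⟩ := hPc.1
    have : 0 < n := by omega
    have : 0 < m := by omega
    positivity
  have : ((n * m).toNat : Int) = n * m := Int.toNat_of_nonneg (by omega)
  exact ⟨⟨h1.1, by omega⟩, ⟨h2.1, by omega⟩⟩

lemma caIter (n m : Int) (g : List (List Int)) (p : Int → Int)
    (hCA : ∀ x, CAe n m g x (p x)) : ∀ (k : Nat) (x : Int), CAe n m g x (p^[k] x) := by
  intro k
  induction k with
  | zero => exact fun x => Relation.EqvGen.refl x
  | succ k ih =>
    intro x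
    rw [Function.iterate_succ_apply' p k x]
    exact Relation.EqvGen.trans _ _ _ (ih x) (hCA (p^[k] x))

theorem unionFold_spec (n m : Int) (g : List (List Int)) :
    ∀ (E : List (Int × Int)) (p : Int → Int),
      UFInv (n * m).toNat p → (∀ x, CAe n m g x (p x)) → (∀ e ∈ E, ERel n m g e.1 e.2) →
      UFInv (n * m).toNat (E.foldl (fun p e => ufUnion p ((n * m).toNat + 1) e.1 e.2) p) ∧
      (∀ x, CAe n m g x ((E.foldl (fun p e => ufUnion p ((n * m).toNat + 1) e.1 e.2) p) x)) ∧
      (∀ e ∈ E, rootP (n * m).toNat (E.foldl (fun p e => ufUnion p ((n * m).toNat + 1) e.1 e.2) p) e.1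
          = rootP (n * m).toNat (E.foldl (fun p e => ufUnion p ((n * m).toNat + 1) e.1 e.2) p) e.2) ∧
      (∀ x y, rootP (n * m).toNat p x = rootP (n * m).toNat p y →
          rootP (n * m).toNat (E.foldl (fun p e => ufUnion p ((n * m).toNat + 1) e.1 e.2) p) x
            = rootP (n * m).toNat (E.foldl (fun p e => ufUnion p ((n * m).toNat + 1) e.1 e.2) p) y) := by
  intro E
  induction E with
  | nil => exact fun p h1 h2 _ => ⟨h1, h2, by simp, fun x y h => h⟩
  | cons e t ih =>
    intro p hInv hCA hE
    have heE : ERel n m g e.1 e.2 := hE e (by simp)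
    have hrange := edge_range n m g heE
    obtain ⟨hInv1, hmono1, hroot1, hpoint1⟩ :=
      ufUnion_spec (n * m).toNat p e.1 e.2 hInv hrange.1 hrange.2
    have hCA1 : ∀ x, CAe n m g x (ufUnion p ((n * m).toNat + 1) e.1 e.2 x) := by
      intro x
      rcases hpoint1 x with h | ⟨hx, h⟩
      · rw [h]; exact hCA x
      · rw [h, hx]
        have c1 : CAe n m g e.1 (rootP (n * m).toNat p e.1) := caIter n m g p hCA _ e.1
        have c2 : CAe n m g e.2 (rootP (n * m).toNat p e.2) := caIter n m g p hCA _ e.2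
        have c3 : CAe n m g e.1 e.2 := Relation.EqvGen.rel _ _ heE
        exact Relation.EqvGen.trans _ _ _
          (Relation.EqvGen.trans _ _ _ (Relation.EqvGen.symm _ _ c1) c3) c2
    obtain ⟨hInvT, hCAT, hrootT, hmonoT⟩ := ih _ hInv1 hCA1 (fun x hx => hE x (by simp [hx]))
    refine ⟨hInvT, hCAT, ?_, ?_⟩
    · intro e' he'
      rcases List.mem_cons.mp he' with rfl | he'
      · exact hmonoT _ _ hroot1
      · exact hrootT e' he'
    · intro x y h
      exact hmonoT x y (hmono1 x y h)

lemma conn_to_CA (n m : Int) (g : List (List Int)) {s c : Int × Int}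
    (h : ConnC n m g s c) : CAe n m g (encl m s) (encl m c) := by
  induction h with
  | refl => exact Relation.EqvGen.refl _
  | tail _ hadj ih =>
    rename_i b cc _
    rcases adj_edge n m g hadj with he | he
    · exact Relation.EqvGen.trans _ _ _ ih (Relation.EqvGen.rel _ _ he)
    · exact Relation.EqvGen.trans _ _ _ ih
        (Relation.EqvGen.symm _ _ (Relation.EqvGen.rel _ _ he))

lemma CA_to_conn (n m : Int) (g : List (List Int)) {x y : Int} (h : CAe n m g x y) :
    x = y ∨ ∃ c d, PosC n m g c ∧ PosC n m g d ∧ x = encl m c ∧ y = encl m d ∧ ConnC n m g c d := by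
  induction h with
  | rel a b hr =>
    obtain ⟨c, d, hPc, hPd, hAdj, he⟩ := edge_endpoints n m g hr
    right
    exact ⟨c, d, hPc, hPd, congrArg Prod.fst he, congrArg Prod.snd he,
      Relation.ReflTransGen.single hAdj⟩
  | refl a => exact Or.inl rfl
  | symm a b _ ih =>
    rcases ih with h | ⟨c, d, hPc, hPd, hx, hy, hcd⟩
    · exact Or.inl h.symm
    · exact Or.inr ⟨d, c, hPd, hPc, hy, hx, connC_symm n m g hcd⟩
  | trans a b cc _ _ ih1 ih2 =>
    rcases ih1 with h1 | ⟨c1, d1, hPc1, hPd1, hx1, hy1, hcd1⟩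
    · rcases ih2 with h2 | h2
      · exact Or.inl (h1.trans h2)
      · rw [h1]; exact Or.inr h2
    · rcases ih2 with h2 | ⟨c2, d2, hPc2, hPd2, hx2, hy2, hcd2⟩
      · rw [← h2]; exact Or.inr ⟨c1, d1, hPc1, hPd1, hx1, hy1, hcd1⟩
      · have : d1 = c2 := encl_inj n m hPd1.1 hPc2.1 (by rw [← hy1, ← hx2])
        subst this
        exact Or.inr ⟨c1, d2, hPc1, hPd2, hx1, hy2, connC_trans n m g hcd1 hcd2⟩

lemma CA_rootEq (n m : Int) (g : List (List Int)) (P : Int → Int)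
    (hroots : ∀ e ∈ allE n m g, rootP (n * m).toNat P e.1 = rootP (n * m).toNat P e.2)
    {x y : Int} (h : CAe n m g x y) :
    rootP (n * m).toNat P x = rootP (n * m).toNat P y := by
  induction h with
  | rel a b hr => exact hroots (a, b) hr
  | refl a => rfl
  | symm a b _ ih => exact ih.symm
  | trans a b cc _ _ ih1 ih2 => exact ih1.trans ih2

lemma ufinv_id (NM : Nat) : UFInv NM (fun x : Int => x) := by
  refine ⟨fun x _ => rfl, fun x h0 hN => ⟨h0, hN⟩, fun x => ?_⟩
  simp

-- ---------- B side: the volume dictionary ----------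

lemma dict_getD (n m : Int) (g : List (List Int)) (R : Int → Int) :
    ∀ (l : List (Int × Int)) (d : PySem.Dict Int Int) (r : Int),
      ((l.foldl (fun d c =>
          if gridAt g c.1 c.2 > 0 then
            d.insert (R (encl m c)) (d.getD (R (encl m c)) 0 + gridAt g c.1 c.2)
          else d) d).getD r 0)
        = d.getD r 0 + ((l.filter (fun c =>
            decide (0 < gridAt g c.1 c.2) && decide (R (encl m c) = r))).map
              (fun c => gridAt g c.1 c.2)).sum := by
  intro l
  induction l with
  | nil => intro d r; simp
  | cons c t ih =>
    intro d r
    simp only [List.foldl_cons, List.filter_cons]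
    by_cases hp : 0 < gridAt g c.1 c.2
    · rw [if_pos hp]
      rw [ih]
      by_cases hr : R (encl m c) = r
      · rw [if_pos (show ((decide (0 < gridAt g c.1 c.2)) && (decide (R (encl m c) = r))) = true by
          simp [hp, hr])]
        simp only [List.map_cons, List.sum_cons]
        rw [PySem.Dict.getD_insert]
        rw [if_pos hr.symm, hr]
        ring
      · rw [if_neg (show ¬ (((decide (0 < gridAt g c.1 c.2)) && (decide (R (encl m c) = r))) = true) by
          simp [hr])]
        rw [PySem.Dict.getD_insert, if_neg (fun hh => hr hh.symm)]
    · rw [if_neg hp]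
      rw [if_neg (show ¬ (((decide (0 < gridAt g c.1 c.2)) && (decide (R (encl m c) = r))) = true) by
        simp [hp])]
      exact ih d r

lemma dict_keys (n m : Int) (g : List (List Int)) (R : Int → Int) :
    ∀ (l : List (Int × Int)) (d : PySem.Dict Int Int) (r : Int),
      (r ∈ (l.foldl (fun d c =>
          if gridAt g c.1 c.2 > 0 then
            d.insert (R (encl m c)) (d.getD (R (encl m c)) 0 + gridAt g c.1 c.2)
          else d) d).keys)
        ↔ (r ∈ d.keys ∨ ∃ c ∈ l, 0 < gridAt g c.1 c.2 ∧ R (encl m c) = r) := by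
  intro l
  induction l with
  | nil => intro d r; simp
  | cons c t ih =>
    intro d r
    simp only [List.foldl_cons]
    by_cases hp : 0 < gridAt g c.1 c.2
    · rw [if_pos hp, ih]
      rw [PySem.Dict.mem_keys_insert]
      constructor
      · rintro ((h | h) | h)
        · exact Or.inr ⟨c, by simp, hp, h.symm⟩
        · exact Or.inl h
        · obtain ⟨c', hc', h1, h2⟩ := h
          exact Or.inr ⟨c', by simp [hc'], h1, h2⟩
      · rintro (h | ⟨c', hc', h1, h2⟩)
        · exact Or.inl (Or.inr h)
        · rcases List.mem_cons.mp hc' with rfl | hc'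
          · exact Or.inl (Or.inl h2.symm)
          · exact Or.inr ⟨c', hc', h1, h2⟩
    · rw [if_neg hp, ih]
      constructor
      · rintro (h | ⟨c', hc', h1, h2⟩)
        · exact Or.inl h
        · exact Or.inr ⟨c', by simp [hc'], h1, h2⟩
      · rintro (h | ⟨c', hc', h1, h2⟩)
        · exact Or.inl h
        · rcases List.mem_cons.mp hc' with rfl | hc'
          · exact absurd h1 hp
          · exact Or.inr ⟨c', hc', h1, h2⟩

lemma dict_nodup (n m : Int) (g : List (List Int)) (R : Int → Int) :
    ∀ (l : List (Int × Int)) (d : PySem.Dict Int Int), d.keys.Nodup →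
      ((l.foldl (fun d c =>
          if gridAt g c.1 c.2 > 0 then
            d.insert (R (encl m c)) (d.getD (R (encl m c)) 0 + gridAt g c.1 c.2)
          else d) d).keys).Nodup := by
  intro l
  induction l with
  | nil => exact fun d h => h
  | cons c t ih =>
    intro d hd
    simp only [List.foldl_cons]
    by_cases hp : 0 < gridAt g c.1 c.2
    · rw [if_pos hp]
      exact ih _ (PySem.Dict.nodup_keys_insert _ _ _ hd)
    · rw [if_neg hp]
      exact ih _ hd

lemma values_getD {D : PySem.Dict Int Int} (hn : D.keys.Nodup) :
    ∀ v ∈ D.values, ∃ k, k ∈ D.keys ∧ D.getD k 0 = v := by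
  intro v hv
  simp only [PySem.Dict.values] at hv
  obtain ⟨p, hp, hpv⟩ := List.mem_map.mp hv
  refine ⟨p.1, ?_, ?_⟩
  · simp only [PySem.Dict.keys]
    exact List.mem_map.mpr ⟨p, hp, rfl⟩
  · rw [← hpv]
    have hp' : (p.1, p.2) ∈ D.items := by rw [Prod.mk.eta]; exact hp
    exact PySem.Dict.getD_of_mem_items D hp' hn 0

lemma getD_values (D : PySem.Dict Int Int) :
    ∀ k ∈ D.keys, D.getD k 0 ∈ D.values := by
  intro k hk
  have h1 : ¬ (D.get? k = none) := by
    intro h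
    rw [PySem.Dict.get?_eq_none_iff_not_mem_keys] at h
    exact h hk
  obtain ⟨v, hv⟩ := Option.ne_none_iff_exists'.mp h1
  rw [PySem.Dict.getD_eq_get?_getD, hv]
  simp only [PySem.Dict.values, Option.getD_some]
  exact List.mem_map.mpr ⟨(k, v), PySem.Dict.mem_items_of_get?_eq_some D hv, rfl⟩

lemma cellBody_eq (n m : Int) (g : List (List Int)) (fuel : Nat) (p : Int → Int) (c : Int × Int) :
    (if gridAt g c.1 c.2 > 0 then
       (if c.2 + 1 < m ∧ gridAt g c.1 (c.2 + 1) > 0 then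
          ufUnion (if c.1 + 1 < n ∧ gridAt g (c.1 + 1) c.2 > 0 then
              ufUnion p fuel (c.1 * m + c.2) ((c.1 + 1) * m + c.2) else p)
            fuel (c.1 * m + c.2) (c.1 * m + c.2 + 1)
        else (if c.1 + 1 < n ∧ gridAt g (c.1 + 1) c.2 > 0 then
              ufUnion p fuel (c.1 * m + c.2) ((c.1 + 1) * m + c.2) else p))
     else p)
    = (edgesOf n m g c).foldl (fun p e => ufUnion p fuel e.1 e.2) p := by
  unfold edgesOf
  by_cases h0 : gridAt g c.1 c.2 > 0
  · rw [if_pos h0]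
    by_cases h2 : c.2 + 1 < m ∧ gridAt g c.1 (c.2 + 1) > 0
    · rw [if_pos h2]
      by_cases h1 : c.1 + 1 < n ∧ gridAt g (c.1 + 1) c.2 > 0
      · rw [if_pos h1, if_pos ⟨h0, h1.1, h1.2⟩, if_pos ⟨h0, h2.1, h2.2⟩]; rfl
      · rw [if_neg h1, if_neg (fun hh => h1 ⟨hh.2.1, hh.2.2⟩), if_pos ⟨h0, h2.1, h2.2⟩]; rfl
    · rw [if_neg h2]
      by_cases h1 : c.1 + 1 < n ∧ gridAt g (c.1 + 1) c.2 > 0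
      · rw [if_pos h1, if_pos ⟨h0, h1.1, h1.2⟩, if_neg (fun hh => h2 ⟨hh.2.1, hh.2.2⟩)]; rfl
      · rw [if_neg h1, if_neg (fun hh => h1 ⟨hh.2.1, hh.2.2⟩), if_neg (fun hh => h2 ⟨hh.2.1, hh.2.2⟩)]; rfl
  · rw [if_neg h0, if_neg (fun hh => h0 hh.1), if_neg (fun hh => h0 hh.1)]; rfl

-- the final parent map of B's union phase
noncomputable def finalP (n m : Int) (g : List (List Int)) : Int → Int :=
  (allE n m g).foldl (fun p e => ufUnion p ((n * m).toNat + 1) e.1 e.2) (fun x => x)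

lemma finalP_spec (n m : Int) (g : List (List Int)) :
    UFInv (n * m).toNat (finalP n m g) ∧
    (∀ x, CAe n m g x (finalP n m g x)) ∧
    (∀ e ∈ allE n m g, rootP (n * m).toNat (finalP n m g) e.1
        = rootP (n * m).toNat (finalP n m g) e.2) := by
  obtain ⟨h1, h2, h3, _⟩ := unionFold_spec n m g (allE n m g) (fun x => x)
    (ufinv_id _) (fun x => Relation.EqvGen.refl x)
    (fun e he => by
      show (e.1, e.2) ∈ allE n m g
      rw [Prod.mk.eta]; exact he)
  exact ⟨h1, h2, h3⟩

lemma rootEq_iff_conn (n m : Int) (g : List (List Int)) {c d : Int × Int}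
    (hPc : PosC n m g c) (hPd : PosC n m g d) :
    rootP (n * m).toNat (finalP n m g) (encl m c) = rootP (n * m).toNat (finalP n m g) (encl m d)
      ↔ ConnC n m g c d := by
  obtain ⟨hInv, hCA, hroots⟩ := finalP_spec n m g
  constructor
  · intro h
    have c1 : CAe n m g (encl m c) (rootP (n * m).toNat (finalP n m g) (encl m c)) :=
      caIter n m g _ hCA _ _
    have c2 : CAe n m g (encl m d) (rootP (n * m).toNat (finalP n m g) (encl m d)) :=
      caIter n m g _ hCA _ _
    have hcd : CAe n m g (encl m c) (encl m d) := by
      rw [h] at c1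
      exact Relation.EqvGen.trans _ _ _ c1 (Relation.EqvGen.symm _ _ c2)
    rcases CA_to_conn n m g hcd with he | ⟨c', d', hPc', hPd', hx, hy, hconn⟩
    · rw [encl_inj n m hPc.1 hPd.1 he]
      exact Relation.ReflTransGen.refl
    · rw [encl_inj n m hPc.1 hPc'.1 hx, encl_inj n m hPd.1 hPd'.1 hy]
      exact hconn
  · intro h
    exact CA_rootEq n m g (finalP n m g) hroots (conn_to_CA n m g h)

lemma class_sum (n m : Int) (g : List (List Int)) {c0 : Int × Int} (hP0 : PosC n m g c0) :
    (((cellsL n m).foldl (fun d c =>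
        if gridAt g c.1 c.2 > 0 then
          d.insert (rootP (n * m).toNat (finalP n m g) (encl m c))
            (d.getD (rootP (n * m).toNat (finalP n m g) (encl m c)) 0 + gridAt g c.1 c.2)
        else d) PySem.Dict.empty).getD
          (rootP (n * m).toNat (finalP n m g) (encl m c0)) 0)
      = compVol n m g c0 := by
  rw [dict_getD n m g (rootP (n * m).toNat (finalP n m g)) (cellsL n m) PySem.Dict.empty]
  rw [PySem.Dict.getD_empty, zero_add]
  have hnodup : ((cellsL n m).filter (fun c =>
      decide (0 < gridAt g c.1 c.2) && decide (rootP (n * m).toNat (finalP n m g) (encl m c)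
        = rootP (n * m).toNat (finalP n m g) (encl m c0)))).Nodup :=
    (nodup_cellsL n m).filter _
  rw [← List.sum_toFinset _ hnodup]
  rw [List.toFinset_filter]
  unfold compVol
  apply Finset.sum_congr _ (fun _ _ => rfl)
  ext x
  rw [Finset.mem_filter, mem_compF]
  show x ∈ cellF n m ∧ (_ && _) = true ↔ _
  rw [Bool.and_eq_true, decide_eq_true_iff, decide_eq_true_iff]
  constructor
  · rintro ⟨hxF, hgx, hroot⟩
    have hPx : PosC n m g x := ⟨(mem_cellF n m x).mp hxF, hgx⟩
    exact ⟨hxF, connC_symm n m g ((rootEq_iff_conn n m g hPx hP0).mp hroot)⟩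
  · rintro ⟨hxF, hconn⟩
    have hPx : PosC n m g x := connC_pos n m g hP0 hconn
    exact ⟨hxF, hPx.2, (rootEq_iff_conn n m g hPx hP0).mpr (connC_symm n m g hconn)⟩

-- the parent map as the port computes it (zeta-reduced body of altCase)
def portParent (n m : Int) (g : List (List Int)) : Int → Int :=
  (PySem.List.pyRange 0 n 1).foldl (fun p i =>
    (PySem.List.pyRange 0 m 1).foldl (fun (p : Int → Int) j =>
      if gridAt g i j > 0 then
        (if j + 1 < m ∧ gridAt g i (j + 1) > 0 then
           ufUnion (if i + 1 < n ∧ gridAt g (i + 1) j > 0 then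
               ufUnion p ((n * m).toNat + 1) (i * m + j) ((i + 1) * m + j) else p)
             ((n * m).toNat + 1) (i * m + j) (i * m + j + 1)
         else (if i + 1 < n ∧ gridAt g (i + 1) j > 0 then
               ufUnion p ((n * m).toNat + 1) (i * m + j) ((i + 1) * m + j) else p))
      else p) p) (fun x => x)

def portDict (n m : Int) (g : List (List Int)) : PySem.Dict Int Int :=
  (PySem.List.pyRange 0 n 1).foldl (fun d i =>
    (PySem.List.pyRange 0 m 1).foldl (fun (d : PySem.Dict Int Int) j =>
      if gridAt g i j > 0 then
        d.insert (ufFind (portParent n m g) ((n * m).toNat + 1) (i * m + j))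
          (d.getD (ufFind (portParent n m g) ((n * m).toNat + 1) (i * m + j)) 0 + gridAt g i j)
      else d) d) PySem.Dict.empty

lemma portParent_eq (n m : Int) (g : List (List Int)) : portParent n m g = finalP n m g := by
  unfold portParent
  rw [foldl_nested n m (fun (p : Int → Int) i j =>
      if gridAt g i j > 0 then
        (if j + 1 < m ∧ gridAt g i (j + 1) > 0 then
           ufUnion (if i + 1 < n ∧ gridAt g (i + 1) j > 0 then
               ufUnion p ((n * m).toNat + 1) (i * m + j) ((i + 1) * m + j) else p)
             ((n * m).toNat + 1) (i * m + j) (i * m + j + 1)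
         else (if i + 1 < n ∧ gridAt g (i + 1) j > 0 then
               ufUnion p ((n * m).toNat + 1) (i * m + j) ((i + 1) * m + j) else p))
      else p) (fun x => x)]
  unfold finalP allE
  rw [foldl_flatMap']
  exact PySem.List.foldl_congr_mem _ _ _ _
    (fun acc x _ => cellBody_eq n m g ((n * m).toNat + 1) acc x)

lemma portDict_eq (n m : Int) (g : List (List Int)) :
    portDict n m g = (cellsL n m).foldl (fun d c =>
        if gridAt g c.1 c.2 > 0 then
          d.insert (rootP (n * m).toNat (finalP n m g) (encl m c))
            (d.getD (rootP (n * m).toNat (finalP n m g) (encl m c)) 0 + gridAt g c.1 c.2)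
        else d) PySem.Dict.empty := by
  unfold portDict
  rw [foldl_nested n m (fun (d : PySem.Dict Int Int) i j =>
      if gridAt g i j > 0 then
        d.insert (ufFind (portParent n m g) ((n * m).toNat + 1) (i * m + j))
          (d.getD (ufFind (portParent n m g) ((n * m).toNat + 1) (i * m + j)) 0 + gridAt g i j)
      else d) PySem.Dict.empty]
  apply PySem.List.foldl_congr_mem
  intro acc x _
  by_cases hp : gridAt g x.1 x.2 > 0
  · rw [if_pos hp, if_pos hp]
    rw [portParent_eq, ufFind_eq_rootP (n * m).toNat (finalP n m g) (finalP_spec n m g).1]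
    rfl
  · rw [if_neg hp, if_neg hp]

lemma amaxL_as_map (n m : Int) (g : List (List Int)) :
    AmaxL n m g = (((cellsL n m).filter (fun c => decide (0 < gridAt g c.1 c.2))).map
      (compVol n m g)).foldl max 0 := by
  unfold AmaxL
  rw [PySem.List.foldl_ite_eq_foldl_filter (p := fun c => 0 < gridAt g c.1 c.2)
    (f := fun a c => max a (compVol n m g c))]
  exact (List.foldl_map).symm

theorem altCase_eq (n m : Int) (g : List (List Int)) :
    altCase (n, m, g) = AmaxL n m g := by
  have h0 : altCase (n, m, g)
      = if n ≤ 0 ∨ m ≤ 0 then 0 else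
          (portDict n m g).values.foldl (fun best v => if v > best then v else best) 0 := rfl
  by_cases hdeg : n ≤ 0 ∨ m ≤ 0
  · rw [h0, if_pos hdeg]
    unfold AmaxL
    rw [cellsL_nil hdeg]
    rfl
  rw [h0, if_neg hdeg]
  have hBif : (portDict n m g).values.foldl (fun best v => if v > best then v else best) 0
      = (portDict n m g).values.foldl max 0 :=
    PySem.List.foldl_congr_mem _ _ _ _ (fun acc x _ => by
      by_cases h : x > acc
      · rw [if_pos h, max_eq_right (le_of_lt h)]
      · rw [if_neg h, max_eq_left (not_lt.mp h)])
  rw [hBif, amaxL_as_map]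
  have hDnodup : (portDict n m g).keys.Nodup := by
    rw [portDict_eq]
    exact dict_nodup n m g _ (cellsL n m) PySem.Dict.empty PySem.Dict.nodup_keys_empty
  have hv1 : ∀ v ∈ (portDict n m g).values, ∃ c0, PosC n m g c0 ∧ v = compVol n m g c0 := by
    intro v hv
    obtain ⟨k, hk, hgd⟩ := values_getD hDnodup v hv
    rw [portDict_eq] at hk hgd
    rcases (dict_keys n m g _ (cellsL n m) PySem.Dict.empty k).mp hk with h | ⟨c0, hc0, hg0, hr0⟩
    · rw [PySem.Dict.keys_empty] at h; exact absurd h (List.not_mem_nil)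
    · have hP0 : PosC n m g c0 := ⟨(mem_cellsL n m c0).mp hc0, hg0⟩
      refine ⟨c0, hP0, ?_⟩
      rw [← hgd, ← hr0]
      exact class_sum n m g hP0
  have hv2 : ∀ c ∈ cellsL n m, 0 < gridAt g c.1 c.2 →
      compVol n m g c ∈ (portDict n m g).values := by
    intro c hc hg
    have hPc : PosC n m g c := ⟨(mem_cellsL n m c).mp hc, hg⟩
    have hk : rootP (n * m).toNat (finalP n m g) (encl m c) ∈ (portDict n m g).keys := by
      rw [portDict_eq]
      exact (dict_keys n m g _ (cellsL n m) PySem.Dict.empty _).mpr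
        (Or.inr ⟨c, hc, hg, rfl⟩)
    have := getD_values (portDict n m g) _ hk
    rw [show (portDict n m g).getD (rootP (n * m).toNat (finalP n m g) (encl m c)) 0
        = compVol n m g c from by rw [portDict_eq]; exact class_sum n m g hPc] at this
    exact this
  apply le_antisymm
  · apply foldl_max_le
    · exact (PySem.List.le_foldl_max _ 0).1
    · intro v hv
      obtain ⟨c0, hP0, rfl⟩ := hv1 v hv
      apply (PySem.List.le_foldl_max _ 0).2
      apply List.mem_map.mpr
      refine ⟨c0, List.mem_filter.mpr ⟨(mem_cellsL n m c0).mpr hP0.1, by simp [hP0.2]⟩, rfl⟩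
  · apply foldl_max_le
    · exact (PySem.List.le_foldl_max _ 0).1
    · intro v hv
      obtain ⟨c0, hc0, rfl⟩ := List.mem_map.mp hv
      obtain ⟨hc0L, hc0g⟩ := List.mem_filter.mp hc0
      exact (PySem.List.le_foldl_max _ 0).2 _
        (hv2 c0 hc0L (by simpa using hc0g))




theorem caseEq (c : Int × Int × List (List Int)) : lakesCase c = altCase c := by
  obtain ⟨n, m, g⟩ := c
  rw [lakesCase_eq, altCase_eq]

-- ===== VERDICT (by name: the statement is the Claim_ definition above) =====
theorem lakes_spec : Claim_equal_lakes := by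
  intro test _ _
  unfold Spec_lakes lakes lakes_alt
  rw [PySem.List.foldl_append_singleton_eq_map]
  simp [List.map_congr_left (fun c _ => caseEq c)]
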